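-- pv_equiv track=rewrite | github.com/ipa-lab/hackingBuddyGPT | src/hackingBuddyGPT/usecases/web_api_testing/documentation/openapi_specification_handler.py | replace_crypto_with_id
-- ===== SOURCE A (Python) =====
-- def replace_crypto_with_id(path):
--     """
-- Replaces any known cryptocurrency name in a URL path with a placeholder `{id}`.
--
-- Useful for generalizing dynamic paths when generating or matching OpenAPI specs.
--
-- Args:
--     path (str): The URL path to process.
--
-- Returns:
--     str: The path with any matching cryptocurrency name replaced by `{id}`.
-- """
--
--     # Default list of cryptos to detect
--     cryptos = ["bitcoin", "ethereum", "litecoin", "dogecoin",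
--                "cardano", "solana"]
--
--     # Convert to lowercase for the match, but preserve the original path for reconstruction if you prefer
--     lower_path = path.lower()
--
--     for crypto in cryptos:
--         if crypto in lower_path:
--             # Example approach: split by '/' and replace the segment that matches crypto
--             parts = path.split('/')
--             replaced_any = False
--             for i, segment in enumerate(parts):
--                 if segment.lower() == crypto:
--                     parts[i] = "{id}"
--                     if segment.lower() == crypto:
--                         parts[i] = "{id}"
--                         replaced_any = True
--                         if replaced_any:
--                             return "/".join(parts)
--
--     return path
-- ===== SOURCE B (Python) =====
-- def replace_crypto_with_id(path):
--     """Single pass over the path segments: rank each crypto by list priority,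
--     keep the candidate segment with the smallest rank (first segment on ties),
--     then replace that one segment with "{id}"."""
--     cryptos = ["bitcoin", "ethereum", "litecoin", "dogecoin",
--                "cardano", "solana"]
--     rank = {c: r for r, c in enumerate(cryptos)}
--     parts = path.split('/')
--     best = None  # (rank, segment index)
--     for i, seg in enumerate(parts):
--         r = rank.get(seg.lower())
--         if r is not None and (best is None or r < best[0]):
--             best = (r, i)
--     if best is None:
--         return path
--     parts[best[1]] = "{id}"
--     return "/".join(parts)
-- ===== Notes on version B (the rewrite author's own statement) =====
-- stated objective: alternative
-- what changed: Instead of looping over the crypto list and rescanning the split path per crypto, B splits once and makes a single pass over the segments with a crypto->priority dict, keeping the (rank, index)-minimal candidate and replacing it at the end.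
import Mathlib
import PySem

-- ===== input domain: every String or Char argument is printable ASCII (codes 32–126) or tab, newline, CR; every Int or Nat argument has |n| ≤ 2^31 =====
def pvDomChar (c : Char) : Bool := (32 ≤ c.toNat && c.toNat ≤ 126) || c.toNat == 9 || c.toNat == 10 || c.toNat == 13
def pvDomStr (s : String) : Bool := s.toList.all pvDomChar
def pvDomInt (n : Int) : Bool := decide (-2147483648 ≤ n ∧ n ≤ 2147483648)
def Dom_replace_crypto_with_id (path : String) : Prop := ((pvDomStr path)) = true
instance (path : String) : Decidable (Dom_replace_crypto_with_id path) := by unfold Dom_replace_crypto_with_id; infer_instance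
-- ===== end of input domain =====

-- B replaces A's per-crypto rescan of the split path by a single pass over the segments with a
-- crypto->priority dict, keeping the (rank, index)-minimal candidate (objective: alternative).

-- ===== PORT A =====
def pvCryptosA : List String := ["bitcoin", "ethereum", "litecoin", "dogecoin", "cardano", "solana"]

-- A's inner 'for i, segment in enumerate(parts)' loop; 'parts' is the mutable list
def pvInnerA (crypto : String) : List String → List (Int × String) → Option String
  | _, [] => none
  | parts, (i, segment) :: rest =>
    if PySem.Str.lower segment == crypto then
      let parts1 := parts.set i.toNat "{id}"        -- i ≥ 0 from enumerate, so .toNat is exact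
      if PySem.Str.lower segment == crypto then
        let parts2 := parts1.set i.toNat "{id}"
        some (PySem.Str.join "/" parts2)            -- replaced_any = True → return "/".join(parts)
      else pvInnerA crypto parts1 rest
    else pvInnerA crypto parts rest

-- A's outer 'for crypto in cryptos' loop
def pvOuterA (path lower_path : String) : List String → String
  | [] => path
  | crypto :: rest =>
    if PySem.Str.isIn crypto lower_path then
      let parts := (PySem.Str.split? path "/").getD []   -- sep "/" is non-empty: split? is always some
      match pvInnerA crypto parts (PySem.List.enumerate parts) with
      | some s => s
      | none => pvOuterA path lower_path rest
    else pvOuterA path lower_path rest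

def replace_crypto_with_id (path : String) : String :=
  pvOuterA path (PySem.Str.lower path) pvCryptosA

-- ===== PORT B =====
def pvCryptosB : List String := ["bitcoin", "ethereum", "litecoin", "dogecoin", "cardano", "solana"]

-- rank = {c: r for r, c in enumerate(cryptos)}
def pvRankB : PySem.Dict String Int :=
  (PySem.List.enumerate pvCryptosB).foldl (fun d p => d.insert p.2 p.1) PySem.Dict.empty

-- the single pass: best = None; for i, seg in enumerate(parts): …
def pvBestB : Option (Int × Int) → List (Int × String) → Option (Int × Int)
  | best, [] => best
  | best, (i, seg) :: rest =>
    match PySem.Dict.get? pvRankB (PySem.Str.lower seg), best with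
    | some r, none => pvBestB (some (r, i)) rest
    | some r, some b => if r < b.1 then pvBestB (some (r, i)) rest else pvBestB (some b) rest
    | none, b => pvBestB b rest

def replace_crypto_with_id_alt (path : String) : String :=
  let parts := (PySem.Str.split? path "/").getD []   -- sep "/" is non-empty: split? is always some
  match pvBestB none (PySem.List.enumerate parts) with
  | some b => PySem.Str.join "/" (parts.set b.2.toNat "{id}")   -- index from enumerate, ≥ 0
  | none => path

-- ===== PRECONDITION & SPEC =====
def Spec_replace_crypto_with_id (path : String) (out : String) : Prop := out = replace_crypto_with_id_alt path
instance (path : String) (out : String) : Decidable (Spec_replace_crypto_with_id path out) := by unfold Spec_replace_crypto_with_id; infer_instance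

-- ===== CLAIM (what is proved, stated in full; the proofs are below) =====
def Claim_equal_replace_crypto_with_id : Prop := ∀ (path : String), Dom_replace_crypto_with_id path → Spec_replace_crypto_with_id path (replace_crypto_with_id path)

-- ===== LEMMAS AND PROOFS =====

-- rank of a (lower-cased) string in a crypto list: position of the first equal element
def pvRkL : List String → String → Option Int
  | [], _ => none
  | c :: cs, q => if c == q then some 0 else (pvRkL cs q).map (fun r => r + 1)

-- first index ≥ i (in enumerate numbering) whose lower-case equals c
def pvMIdx (c : String) : Int → List String → Option Int
  | _, [] => none
  | i, s :: ss => if PySem.Str.lower s == c then some i else pvMIdx c (i + 1) ss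

-- keep p unless q has strictly smaller rank (B's update rule)
def pvChooseP (p : Int × Int) : Option (Int × Int) → Int × Int
  | none => p
  | some q => if q.1 < p.1 then q else p

def pvChooseO : Option (Int × Int) → Option (Int × Int) → Option (Int × Int)
  | none, m => m
  | some p, none => some p
  | some p, some q => some (pvChooseP p (some q))

-- the (rank, index)-lexicographically minimal candidate, first index winning ties
def pvHMin (cs : List String) : Int → List String → Option (Int × Int)
  | _, [] => none
  | i, s :: ss =>
    match pvRkL cs (PySem.Str.lower s) with
    | some r => some (pvChooseP (r, i) (pvHMin cs (i + 1) ss))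
    | none => pvHMin cs (i + 1) ss

-- index replaced by A: scan the cryptos in order, take the first with a matching segment
def pvFFirst (parts : List String) : List String → Option Int
  | [] => none
  | c :: cs =>
    match pvMIdx c 0 parts with
    | some j => some j
    | none => pvFFirst parts cs

lemma pvRank_get (q : String) : PySem.Dict.get? pvRankB q = pvRkL pvCryptosB q := by
  have h : pvRankB = PySem.Dict.mk [("bitcoin", (0 : Int)), ("ethereum", 1), ("litecoin", 2),
      ("dogecoin", 3), ("cardano", 4), ("solana", 5)] := by rfl
  rw [h]
  simp only [pvCryptosB, pvRkL, PySem.Dict.get?_mk_cons]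
  split_ifs <;> simp [PySem.Dict.get?]

lemma pvInnerA_char (c : String) (parts : List String) :
    ∀ (l : List String) (i : Int),
      pvInnerA c parts (PySem.List.enumerate l i) =
        (pvMIdx c i l).map (fun j => PySem.Str.join "/" (parts.set j.toNat "{id}")) := by
  intro l
  induction l generalizing parts with
  | nil => intro i; rfl
  | cons s ss ih =>
    intro i
    rw [PySem.List.enumerate_cons]
    simp only [pvInnerA, pvMIdx]
    split
    · simp [List.set_set]
    · exact ih parts (i + 1)

lemma pvChooseO_some (p : Int × Int) (m : Option (Int × Int)) :
    pvChooseO (some p) m = some (pvChooseP p m) := by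
  cases m <;> rfl

lemma pvChooseP_assoc (p q : Int × Int) (m : Option (Int × Int)) :
    pvChooseP (pvChooseP p (some q)) m = pvChooseP p (some (pvChooseP q m)) := by
  cases m with
  | none => rfl
  | some x =>
    simp only [pvChooseP]
    split_ifs <;> simp_all <;> omega

lemma pvBestB_char (l : List String) :
    ∀ (i : Int) (b : Option (Int × Int)),
      pvBestB b (PySem.List.enumerate l i) = pvChooseO b (pvHMin pvCryptosB i l) := by
  induction l with
  | nil => intro i b; cases b <;> rfl
  | cons s ss ih =>
    intro i b
    rw [PySem.List.enumerate_cons]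
    simp only [pvBestB, pvHMin, pvRank_get]
    cases hr : pvRkL pvCryptosB (PySem.Str.lower s) with
    | none =>
      cases b <;> dsimp only <;> exact ih (i + 1) _
    | some r =>
      cases b with
      | none =>
        dsimp only
        rw [ih (i + 1) (some (r, i)), pvChooseO_some]
        rfl
      | some p =>
        dsimp only
        rw [ih (i + 1) (some (r, i)), ih (i + 1) (some p)]
        rw [pvChooseO_some, pvChooseO_some, pvChooseO_some]
        rw [show (if r < p.1 then some (pvChooseP (r, i) (pvHMin pvCryptosB (i + 1) ss))
              else some (pvChooseP p (pvHMin pvCryptosB (i + 1) ss)))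
            = some (pvChooseP (pvChooseP p (some (r, i))) (pvHMin pvCryptosB (i + 1) ss)) from by
          simp only [pvChooseP]; split_ifs <;> rfl]
        rw [pvChooseP_assoc]

lemma pvMem_splitOn_go_infix (sep : List Char) :
    ∀ (fuel : Nat) (l cur : List Char) (acc : List (List Char)) (s : List Char),
      (cur.reverse ++ l) <:+: s → (∀ x ∈ acc, x <:+: s) →
      ∀ x ∈ PySem.Chars.splitOn.go sep fuel l cur acc, x <:+: s := by
  intro fuel
  induction fuel with
  | zero =>
    intro l cur acc s h1 h2 x hx
    simp only [PySem.Chars.splitOn.go, List.mem_reverse, List.mem_cons] at hx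
    rcases hx with rfl | hx
    · exact h1
    · exact h2 x hx
  | succ fuel ih =>
    intro l cur acc s h1 h2 x hx
    have hcurv : cur.reverse <:+: s := ((List.prefix_append cur.reverse l).isInfix).trans h1
    cases l with
    | nil =>
      simp only [PySem.Chars.splitOn.go, List.mem_reverse, List.mem_cons] at hx
      rcases hx with rfl | hx
      · simpa using hcurv
      · exact h2 x hx
    | cons ch rest =>
      simp only [PySem.Chars.splitOn.go] at hx
      split at hx
      · refine ih _ _ _ s ?_ ?_ x hx
        · have hl : (ch :: rest) <:+: s := ((List.suffix_append cur.reverse (ch :: rest)).isInfix).trans h1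
          simpa using ((List.drop_suffix sep.length (ch :: rest)).isInfix).trans hl
        · intro y hy
          rcases List.mem_cons.mp hy with rfl | hy
          · simpa using hcurv
          · exact h2 y hy
      · refine ih _ _ _ s ?_ ?_ x hx
        · simpa [List.append_assoc] using h1
        · exact h2

lemma pvIsIn_parts (path seg : String)
    (hmem : seg ∈ (PySem.Str.split? path "/").getD []) :
    PySem.Str.isIn (PySem.Str.lower seg) (PySem.Str.lower path) = true := by
  have hsplit : PySem.Str.split? path "/"
      = some ((PySem.Chars.splitOn path.toList ['/']).map String.ofList) := by
    simp [PySem.Str.split?, PySem.Chars.split?]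
  rw [hsplit] at hmem
  simp only [Option.getD_some, List.mem_map] at hmem
  obtain ⟨cs, hcs, rfl⟩ := hmem
  have hinf : cs <:+: path.toList := by
    refine pvMem_splitOn_go_infix ['/'] (path.toList.length + 1) path.toList [] [] path.toList
      (by simp) (by simp) cs ?_
    exact hcs
  rw [PySem.Str.isIn_iff_infix]
  simp only [PySem.Str.toList_lower, PySem.Chars.lower, String.toList_ofList]
  exact hinf.map PySem.Chars.lowerChar

lemma pvMIdx_mem (c : String) :
    ∀ (l : List String) (i : Int) (j : Int), pvMIdx c i l = some j →
      ∃ s ∈ l, PySem.Str.lower s = c := by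
  intro l
  induction l with
  | nil => intro i j h; simp [pvMIdx] at h
  | cons s ss ih =>
    intro i j h
    simp only [pvMIdx] at h
    split at h
    · rename_i hb; exact ⟨s, by simp, eq_of_beq hb⟩
    · obtain ⟨t, ht, hlt⟩ := ih (i + 1) j h
      exact ⟨t, by simp [ht], hlt⟩

lemma pvOuterA_char (path : String) :
    ∀ (cs : List String),
      pvOuterA path (PySem.Str.lower path) cs =
        match pvFFirst ((PySem.Str.split? path "/").getD []) cs with
        | some j => PySem.Str.join "/" (((PySem.Str.split? path "/").getD []).set j.toNat "{id}")
        | none => path := by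
  intro cs
  induction cs with
  | nil => rfl
  | cons c cs ih =>
    simp only [pvOuterA, pvFFirst]
    rw [pvInnerA_char c _ _ 0]
    cases hm : pvMIdx c 0 ((PySem.Str.split? path "/").getD []) with
    | none =>
      simp only [Option.map_none]
      cases hin : PySem.Str.isIn c (PySem.Str.lower path) <;> simp [ih]
    | some j =>
      obtain ⟨seg, hseg, hlow⟩ := pvMIdx_mem c _ 0 j hm
      have hin : PySem.Str.isIn c (PySem.Str.lower path) = true := by
        rw [← hlow]; exact pvIsIn_parts path seg hseg
      have hin' := hin
      simp only [PySem.Str.isIn_eq, PySem.Str.toList_lower] at hin'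
      simp [hin']

lemma pvRkL_nonneg (cs : List String) (q : String) (r : Int) (h : pvRkL cs q = some r) : 0 ≤ r := by
  induction cs generalizing r with
  | nil => simp [pvRkL] at h
  | cons c cs ih =>
    simp only [pvRkL] at h
    split at h
    · simp only [Option.some.injEq] at h; omega
    · obtain ⟨r', hr', rfl⟩ := Option.map_eq_some_iff.mp h
      have := ih r' hr'
      omega

lemma pvHMin_nonneg (cs : List String) :
    ∀ (l : List String) (i : Int) (p : Int × Int), pvHMin cs i l = some p → 0 ≤ p.1 := by
  intro l
  induction l with
  | nil => intro i p h; simp [pvHMin] at h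
  | cons s ss ih =>
    intro i p h
    simp only [pvHMin] at h
    cases hr : pvRkL cs (PySem.Str.lower s) with
    | none => rw [hr] at h; exact ih (i + 1) p h
    | some r =>
      rw [hr] at h
      have hr0 := pvRkL_nonneg cs _ r hr
      simp only [Option.some.injEq] at h
      subst h
      cases h' : pvHMin cs (i + 1) ss with
      | none => simpa [pvChooseP] using hr0
      | some q =>
        have := ih (i + 1) q h'
        simp only [pvChooseP]
        split <;> simp <;> omega

lemma pvHMin_cons (c : String) (cs : List String) :
    ∀ (l : List String) (i : Int),
      pvHMin (c :: cs) i l =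
        match pvMIdx c i l with
        | some j => some (0, j)
        | none => (pvHMin cs i l).map (fun p => (p.1 + 1, p.2)) := by
  intro l
  induction l with
  | nil => intro i; rfl
  | cons s ss ih =>
    intro i
    simp only [pvHMin, pvMIdx, pvRkL]
    by_cases hc : (c == PySem.Str.lower s) = true
    · rw [if_pos hc, if_pos (beq_iff_eq.mpr (eq_of_beq hc).symm)]
      dsimp only
      have hkeep : pvChooseP (0, i) (pvHMin (c :: cs) (i + 1) ss) = (0, i) := by
        cases h' : pvHMin (c :: cs) (i + 1) ss with
        | none => rfl
        | some q =>
          have := pvHMin_nonneg (c :: cs) ss (i + 1) q h'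
          simp only [pvChooseP]
          rw [if_neg (by omega)]
      rw [hkeep]
    · rw [if_neg hc, if_neg (fun hb => hc (beq_iff_eq.mpr (eq_of_beq hb).symm))]
      cases hr : pvRkL cs (PySem.Str.lower s) with
      | none =>
        dsimp only
        exact ih (i + 1)
      | some r =>
        have hr0 := pvRkL_nonneg cs _ r hr
        simp only [Option.map_some]
        rw [ih (i + 1)]
        cases hm : pvMIdx c (i + 1) ss with
        | some j =>
          dsimp only
          have : pvChooseP (r + 1, i) (some ((0 : Int), j)) = (0, j) := by
            simp only [pvChooseP]; rw [if_pos (by omega)]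
          rw [this]
        | none =>
          dsimp only
          cases h' : pvHMin cs (i + 1) ss with
          | none => rfl
          | some q =>
            simp only [Option.map_some, pvChooseP]
            split_ifs <;> simp <;> omega

lemma pvHMin_nil : ∀ (l : List String) (i : Int), pvHMin [] i l = none := by
  intro l
  induction l with
  | nil => intro i; rfl
  | cons s ss ih => intro i; simpa [pvHMin, pvRkL] using ih (i + 1)

lemma pvFFirst_eq (parts : List String) :
    ∀ (cs : List String), (pvHMin cs 0 parts).map Prod.snd = pvFFirst parts cs := by
  intro cs
  induction cs with
  | nil => rw [pvHMin_nil]; rfl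
  | cons c cs ih =>
    rw [pvHMin_cons]
    simp only [pvFFirst]
    cases hm : pvMIdx c 0 parts with
    | some j => simp
    | none => simp only [Option.map_map]; exact ih

-- ===== VERDICT (by name: the statement is the Claim_ definition above) =====
theorem replace_crypto_with_id_spec : Claim_equal_replace_crypto_with_id := by
  intro path _
  unfold Spec_replace_crypto_with_id replace_crypto_with_id replace_crypto_with_id_alt
  show pvOuterA path (PySem.Str.lower path) pvCryptosA =
      (match pvBestB none (PySem.List.enumerate ((PySem.Str.split? path "/").getD [])) with
        | some b => PySem.Str.join "/" ((((PySem.Str.split? path "/").getD []).set b.2.toNat "{id}"))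
        | none => path)
  rw [pvOuterA_char path pvCryptosA, pvBestB_char _ 0 none]
  rw [show pvCryptosA = pvCryptosB from rfl, ← pvFFirst_eq ((PySem.Str.split? path "/").getD []) pvCryptosB]
  cases h : pvHMin pvCryptosB 0 ((PySem.Str.split? path "/").getD []) with
  | none => simp [pvChooseO]
  | some p => simp [pvChooseO]
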